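-- pv_equiv track=rewrite | github.com/glennwli/bootcamp | exercise1/secondary_structure.py | verify_hairpin
-- ===== SOURCE A (Python) =====
-- def validate_par (structure):
--     """makes sure number of open = number of closed"""
--
--     if structure.count('(') == structure.count(')') and structure.find('(')<structure.find(')'):
--         return True
--
--     return False
--
-- def dotparen_to_bp(structure):
--     """converts dot parens"""
--
--     #check if valid
--     if validate_par(structure) == False:
--         return -1
--
--     open_coord = []
--     basepairs = []
--
--     for i, char in enumerate(structure):
--         if char == '(':
--             open_coord.append(i)
--         elif char ==')':
--             if len(open_coord)>0:
--                 basepairs.append((open_coord.pop(),i))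
--             else:
--                 return -1
--     return tuple(sorted(basepairs))
--
-- def verify_hairpin(structure):
--     """check validity of hairpins"""
--     #get basepairs
--     basepairs = dotparen_to_bp(structure)
--
--     #make sure the structure was valid
--     if basepairs == -1:
--         return False
--
--     #check that they're all at least 4 apart
--     for bp in basepairs:
--         if bp[0] + 4 >= bp[1]:
--             return False
--
--     return True
-- ===== SOURCE B (Python) =====
-- def verify_hairpin(structure):
--     """check validity of hairpins: single pass with a stack of open indices,
--     early exit on any defect; no separate count/find validation and no sort."""
--     stack = []
--     paired = False
--     for i, ch in enumerate(structure):
--         if ch == '(':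
--             stack.append(i)
--         elif ch == ')':
--             if not stack:
--                 return False
--             o = stack.pop()
--             if o + 4 >= i:
--                 return False
--             paired = True
--     return not stack and paired
-- ===== Notes on version B (the rewrite author's own statement) =====
-- stated objective: simpler
-- what changed: Replaces A's three-function pipeline (count/find validation, pair-collecting loop, sort, second distance-checking loop) by one self-contained single pass over the string with a stack, checking the distance at pop time and tracking whether any pair formed.
import Mathlib
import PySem

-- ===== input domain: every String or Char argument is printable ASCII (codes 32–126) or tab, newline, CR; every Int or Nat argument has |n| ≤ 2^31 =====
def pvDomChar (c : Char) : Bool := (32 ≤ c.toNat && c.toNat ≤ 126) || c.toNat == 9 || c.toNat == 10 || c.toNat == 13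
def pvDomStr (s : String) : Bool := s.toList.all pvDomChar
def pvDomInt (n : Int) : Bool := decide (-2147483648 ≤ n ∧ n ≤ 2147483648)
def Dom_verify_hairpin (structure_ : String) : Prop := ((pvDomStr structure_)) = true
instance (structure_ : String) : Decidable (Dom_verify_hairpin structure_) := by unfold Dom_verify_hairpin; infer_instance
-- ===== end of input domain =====

-- B replaces A's count/find validation + pair collection + sort + second loop by one
-- single stack pass with early exit; same return value on every input (objective: simpler).


-- ===== PORT A =====
def validate_par (structure_ : String) : Bool :=
  if PySem.Str.count structure_ "(" = PySem.Str.count structure_ ")" ∧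
     PySem.Str.find structure_ "(" < PySem.Str.find structure_ ")" then
    true
  else
    false

-- the for-loop of dotparen_to_bp (early 'return -1' = none)
def dp_loop : List (Int × Char) → List Int → List (Int × Int) → Option (List (Int × Int))
  | [], _, basepairs => some basepairs
  | (i, char) :: rest, open_coord, basepairs =>
    if char = '(' then dp_loop rest (open_coord ++ [i]) basepairs
    else if char = ')' then
      if open_coord.length > 0 then
        match PySem.List.pop? open_coord with
        | some (o, oc') => dp_loop rest oc' (basepairs ++ [(o, i)])
        | none => none
      else none
    else dp_loop rest open_coord basepairs

-- dotparen_to_bp: -1 becomes none, the returned tuple becomes some (sorted list)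
def dotparen_to_bp (structure_ : String) : Option (List (Int × Int)) :=
  if validate_par structure_ = false then none
  else
    match dp_loop (PySem.List.enumerate structure_.toList) [] [] with
    | none => none
    | some basepairs => some (PySem.List.sorted2 basepairs (·.1) (·.2))

-- the final for-loop of verify_hairpin
def hp_check : List (Int × Int) → Bool
  | [] => true
  | bp :: rest => if bp.1 + 4 ≥ bp.2 then false else hp_check rest

def verify_hairpin (structure_ : String) : Bool :=
  match dotparen_to_bp structure_ with
  | none => false
  | some basepairs => hp_check basepairs

-- ===== PORT B =====
def hairpin_loop : List (Int × Char) → List Int → Bool → Bool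
  | [], stack, paired => stack.isEmpty && paired
  | (i, ch) :: rest, stack, paired =>
    if ch = '(' then hairpin_loop rest (stack ++ [i]) paired
    else if ch = ')' then
      match stack.getLast? with
      | none => false
      | some o => if o + 4 ≥ i then false else hairpin_loop rest stack.dropLast true
    else hairpin_loop rest stack paired

def verify_hairpin_alt (structure_ : String) : Bool :=
  hairpin_loop (PySem.List.enumerate structure_.toList) [] false

-- ===== PRECONDITION & SPEC =====
def Spec_verify_hairpin (structure_ : String) (out : Bool) : Prop := out = verify_hairpin_alt structure_
instance (structure_ : String) (out : Bool) : Decidable (Spec_verify_hairpin structure_ out) := by unfold Spec_verify_hairpin; infer_instance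

-- ===== CLAIM (what is proved, stated in full; the proofs are below) =====
def Claim_equal_verify_hairpin : Prop := ∀ (structure_ : String), Dom_verify_hairpin structure_ → Spec_verify_hairpin structure_ (verify_hairpin structure_)

-- ===== LEMMAS AND PROOFS =====

def pvScan : List (Int × Char) → List Int → List (Int × Int) × List Int × Bool
  | [], oc => ([], oc, true)
  | (i, c) :: rest, oc =>
    if c = '(' then pvScan rest (oc ++ [i])
    else if c = ')' then
      match oc.getLast? with
      | none => ([], oc, false)
      | some o =>
        let r := pvScan rest oc.dropLast
        ((o, i) :: r.1, r.2)
    else pvScan rest oc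

def pvViol (bp : Int × Int) : Bool := decide (bp.1 + 4 ≥ bp.2)

theorem dp_loop_eq_scan (L : List (Int × Char)) (oc : List Int) (bps : List (Int × Int)) :
    dp_loop L oc bps =
      if (pvScan L oc).2.2 then some (bps ++ (pvScan L oc).1) else none := by
  induction L generalizing oc bps with
  | nil => simp [dp_loop, pvScan]
  | cons hd rest ih =>
    obtain ⟨i, c⟩ := hd
    by_cases h1 : c = '('
    · simp [dp_loop, pvScan, h1, ih]
    · by_cases h2 : c = ')'
      · rcases oc.eq_nil_or_concat with rfl | ⟨ys, y, rfl⟩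
        · simp [dp_loop, pvScan, h2]
        · simp [dp_loop, pvScan, h2, List.concat_eq_append, PySem.List.pop?_last, ih]
      · simp [dp_loop, pvScan, h1, h2, ih]

theorem hairpin_loop_eq_scan (L : List (Int × Char)) (oc : List Int) (p : Bool) :
    hairpin_loop L oc p =
      ((pvScan L oc).2.2 && !((pvScan L oc).1.any pvViol) && (pvScan L oc).2.1.isEmpty
        && (p || !(pvScan L oc).1.isEmpty)) := by
  induction L generalizing oc p with
  | nil => simp [hairpin_loop, pvScan, Bool.and_comm]
  | cons hd rest ih =>
    obtain ⟨i, c⟩ := hd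
    by_cases h1 : c = '('
    · simp [hairpin_loop, pvScan, h1, ih]
    · by_cases h2 : c = ')'
      · rcases oc.eq_nil_or_concat with rfl | ⟨ys, y, rfl⟩
        · simp [hairpin_loop, pvScan, h2]
        · by_cases hv : y + 4 ≥ i
          · simp [hairpin_loop, pvScan, h2, List.concat_eq_append, hv, pvViol]
          · simp [hairpin_loop, pvScan, h2, List.concat_eq_append, hv, pvViol, ih]
      · simp [hairpin_loop, pvScan, h1, h2, ih]

theorem hp_check_eq_any (bps : List (Int × Int)) : hp_check bps = !bps.any pvViol := by
  induction bps with
  | nil => simp [hp_check]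
  | cons bp rest ih =>
    by_cases h : bp.1 + 4 ≥ bp.2 <;> simp [hp_check, h, pvViol, ih]

theorem scan_counts (L : List (Int × Char)) (oc : List Int)
    (h : (pvScan L oc).2.2 = true) :
    (pvScan L oc).1.length = L.countP (fun q => decide (q.2 = ')')) ∧
    (pvScan L oc).2.1.length + (pvScan L oc).1.length
      = oc.length + L.countP (fun q => decide (q.2 = '(')) := by
  induction L generalizing oc with
  | nil => simp [pvScan]
  | cons hd rest ih =>
    obtain ⟨i, c⟩ := hd
    by_cases h1 : c = '('
    · simp only [pvScan, h1, if_pos] at h ⊢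
      obtain ⟨c1, c2⟩ := ih (oc ++ [i]) h
      simp only [List.length_append, List.length_cons, List.length_nil] at c2
      simp [c1]
      omega
    · by_cases h2 : c = ')'
      · rcases oc.eq_nil_or_concat with rfl | ⟨ys, y, rfl⟩
        · simp [pvScan, h2] at h
        · simp only [pvScan, h2, List.concat_eq_append,
            List.getLast?_concat, List.dropLast_concat] at h ⊢
          obtain ⟨c1, c2⟩ := ih ys h
          simp [c1]
          omega
      · simp only [pvScan, h1, h2] at h ⊢
        obtain ⟨c1, c2⟩ := ih oc h
        simp [List.countP_cons, h1, h2, c1]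
        omega

theorem scan_open_before (L : List (Int × Char)) (oc : List Int)
    (h : (pvScan L oc).2.2 = true) (j : Nat) (hj : j < L.length) (hc : L[j].2 = ')') :
    oc ≠ [] ∨ ∃ i, i < j ∧ ∃ hi : i < L.length, L[i].2 = '(' := by
  induction L generalizing oc j with
  | nil => simp at hj
  | cons hd rest ih =>
    obtain ⟨i, c⟩ := hd
    match j with
    | 0 =>
      simp at hc
      rcases oc.eq_nil_or_concat with rfl | ⟨ys, y, rfl⟩
      · simp [pvScan, hc] at h
      · exact Or.inl (by simp)
    | j + 1 =>
      by_cases h1 : c = '('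
      · exact Or.inr ⟨0, by omega, by simp, by simpa using h1⟩
      · by_cases h2 : c = ')'
        · rcases oc.eq_nil_or_concat with rfl | ⟨ys, y, rfl⟩
          · simp [pvScan, h2] at h
          · simp only [pvScan, h2, List.concat_eq_append,
              List.getLast?_concat, List.dropLast_concat] at h
            rcases ih ys h j (by simpa using Nat.lt_of_succ_lt_succ hj) (by simpa using hc) with hl | ⟨i', hi'j, hi', hopen⟩
            · exact Or.inl (by simp)
            · exact Or.inr ⟨i' + 1, by omega, by simpa using Nat.succ_lt_succ hi', by simpa using hopen⟩
        · simp only [pvScan, h1, h2] at h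
          rcases ih oc h j (by simpa using Nat.lt_of_succ_lt_succ hj) (by simpa using hc) with hl | ⟨i', hi'j, hi', hopen⟩
          · exact Or.inl hl
          · exact Or.inr ⟨i' + 1, by omega, by simpa using Nat.succ_lt_succ hi', by simpa using hopen⟩

theorem count_go_singleton (c : Char) (l : List Char) (fuel acc : Nat) (h : l.length ≤ fuel) :
    PySem.Chars.count.go [c] fuel l acc = acc + l.count c := by
  induction l generalizing fuel acc with
  | nil => cases fuel <;> simp [PySem.Chars.count.go]
  | cons hd t ih =>
    match fuel with
    | 0 => simp at h
    | f + 1 =>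
      simp only [PySem.Chars.count.go]
      by_cases hc : c = hd
      · subst hc
        have := ih f (acc + 1) (by simp at h; omega)
        simp [List.isPrefixOf, this]
        omega
      · have := ih f acc (by simp at h; omega)
        simp [List.isPrefixOf, hc, this, Ne.symm hc]

theorem chars_count_singleton (c : Char) (l : List Char) :
    PySem.Chars.count l [c] = l.count c := by
  have := count_go_singleton c l l.length 0 le_rfl
  simpa [PySem.Chars.count] using this

theorem singleton_prefix_iff (c : Char) (m : List Char) : [c] <+: m ↔ m.head? = some c := by
  cases m with
  | nil => simp
  | cons hd t => constructor
                 · rintro ⟨u, hu⟩; simp at hu; simp [hu.1]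
                 · intro h; simp at h; exact ⟨t, by simp [h]⟩

theorem singleton_infix_iff (c : Char) (l : List Char) : [c] <:+: l ↔ c ∈ l := by
  constructor
  · intro h; exact h.subset (by simp)
  · intro h; obtain ⟨u, v, huv⟩ := List.append_of_mem h
    exact ⟨u, v, by simp [huv]⟩

theorem validate_par_eq (s : String) :
    validate_par s = true ↔
      (s.toList.count '(' = s.toList.count ')' ∧
       PySem.Chars.find s.toList ['('] < PySem.Chars.find s.toList [')']) := by
  have h1 : ("(" : String).toList = ['('] := rfl
  have h2 : (")" : String).toList = [')'] := rfl
  simp [validate_par, PySem.Str.count_eq, PySem.Str.find_eq, h1, h2, chars_count_singleton]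

theorem countP_enumerate_eq_count (l : List Char) (c : Char) :
    (PySem.List.enumerate l).countP (fun q => decide (q.2 = c)) = l.count c := by
  have h1 : (PySem.List.enumerate l).map (·.2) = l := PySem.List.map_snd_enumerate _ _
  calc (PySem.List.enumerate l).countP (fun q => decide (q.2 = c))
      = ((PySem.List.enumerate l).map (·.2)).countP (fun x => decide (x = c)) := by
        rw [List.countP_map]; rfl
    _ = l.count c := by rw [h1, List.count]; apply List.countP_congr; intro x _; simp

theorem verify_hairpin_spec' (s : String) : verify_hairpin s = verify_hairpin_alt s := by
  unfold verify_hairpin verify_hairpin_alt dotparen_to_bp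
  rw [dp_loop_eq_scan, hairpin_loop_eq_scan]
  by_cases hok : (pvScan (PySem.List.enumerate s.toList) []).2.2 = true
  case neg =>
    simp only [Bool.not_eq_true] at hok
    simp [hok]
  case pos =>
    set l := s.toList with hl
    set E := PySem.List.enumerate l with hEdef
    obtain ⟨hc1, hc2⟩ := scan_counts E [] hok
    rw [countP_enumerate_eq_count] at hc1
    rw [countP_enumerate_eq_count] at hc2
    simp only [List.length_nil, Nat.zero_add] at hc2
    have hElen : E.length = l.length := PySem.List.length_enumerate _ _
    by_cases hnil : (pvScan E []).1 = []
    · have hcount : l.count ')' = 0 := by rw [← hc1, hnil]; rfl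
      have hmem : ')' ∉ l := by
        intro hm; exact absurd hcount (by simpa using (List.count_pos_iff.mpr hm).ne')
      have hfind : PySem.Chars.find l [')'] = -1 :=
        (PySem.Chars.find_eq_neg_one_iff _ _).mpr (fun hin => hmem ((singleton_infix_iff _ _).mp hin))
      have hval : validate_par s = false := by
        rw [Bool.eq_false_iff]
        intro hv
        obtain ⟨_, hlt⟩ := (validate_par_eq s).mp hv
        rw [← hl, hfind] at hlt
        have := PySem.Chars.neg_one_le_find l ['(']
        omega
      simp [hok, hval, hnil]
    · by_cases hstk : (pvScan E []).2.1 = []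
      · -- pairs formed, stack empty: A's validation passes; both reduce to the distance check
        have hcnt : l.count '(' = l.count ')' := by
          have hz : (pvScan E []).2.1.length = 0 := by rw [hstk]; rfl
          omega
        have hclose : ')' ∈ l := by
          have : 0 < l.count ')' := by
            rw [← hc1]; exact List.length_pos_iff.mpr hnil
          exact List.count_pos_iff.mp this
        have hinfc : [')'] <:+: l := (singleton_infix_iff _ _).mpr hclose
        have hgec : 0 ≤ PySem.Chars.find l [')'] := (PySem.Chars.find_nonneg_iff _ _).mpr hinfc
        obtain ⟨hpre, hmin⟩ := PySem.Chars.find_spec hgec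
        set j := (PySem.Chars.find l [')']).toNat with hj
        have hhead : l[j]? = some ')' := by
          rw [← List.head?_drop]
          exact (singleton_prefix_iff _ _).mp hpre
        have hjlen : j < l.length := by
          by_contra hcon
          simp [List.getElem?_eq_none (Nat.le_of_not_lt hcon)] at hhead
        have hEj : E[j]'(by rw [hElen]; exact hjlen) = ((0 : Int) + j, l[j]) :=
          PySem.List.getElem_enumerate l 0 j (by rw [hElen]; exact hjlen)
        rcases scan_open_before E [] hok j (by rw [hElen]; exact hjlen)
            (by rw [hEj]; simpa using List.getElem?_eq_some_iff.mp hhead |>.choose_spec) with hbad | ⟨i, hij, hiE, hopen⟩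
        · exact absurd rfl hbad
        · have hil : i < l.length := by rw [← hElen]; exact hiE
          have hEi : E[i]'hiE = ((0 : Int) + i, l[i]) :=
            PySem.List.getElem_enumerate l 0 i (by rw [hElen]; exact hil)
          have hopen' : l[i] = '(' := by rw [hEi] at hopen; exact hopen
          have hinfo : ['('] <:+: l :=
            (singleton_infix_iff _ _).mpr (hopen' ▸ l.getElem_mem hil)
          have hgeo : 0 ≤ PySem.Chars.find l ['('] := (PySem.Chars.find_nonneg_iff _ _).mpr hinfo
          obtain ⟨_, hmino⟩ := PySem.Chars.find_spec hgeo
          have hle : (PySem.Chars.find l ['(']).toNat ≤ i := by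
            by_contra hcon
            exact hmino i (by omega)
              ((singleton_prefix_iff _ _).mpr (by rw [List.head?_drop]; simp [hopen', hil]))
          have hlt : PySem.Chars.find l ['('] < PySem.Chars.find l [')'] := by omega
          have hval : validate_par s = true := (validate_par_eq s).mpr ⟨hcnt, hlt⟩
          have hperm := PySem.List.sorted2_perm (pvScan E []).1 (fun x => x.1) (fun x => x.2) false
          simp [hval, hok, hstk, hnil, hp_check_eq_any, hperm.any_eq]
      · -- leftover open parens: counts differ, A's validation fails; B sees a nonempty stack
        have hne : l.count '(' ≠ l.count ')' := by
          have : (pvScan E []).2.1.length ≠ 0 := by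
            simpa [List.length_eq_zero_iff] using hstk
          omega
        have hval : validate_par s = false := by
          rw [Bool.eq_false_iff]
          intro hv
          exact hne ((validate_par_eq s).mp hv).1
        simp [hok, hval, hstk]

-- ===== VERDICT (by name: the statement is the Claim_ definition above) =====
theorem verify_hairpin_spec : Claim_equal_verify_hairpin := by
  intro structure_ _
  exact verify_hairpin_spec' structure_
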